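-- pv_equiv track=rewrite | github.com/SquareShiftTech/tableau-to-looker-accelerator | src/tableau_to_looker_parser/core/field_validation_engine.py | _suggest_aggregated_measure
-- ===== SOURCE A (Python) =====
-- from typing import Dict, List, Set, Optional
--
-- def _suggest_aggregated_measure(field_name: str) -> Dict:
--     """Suggest creating an aggregated measure."""
--     # Extract aggregation and base field
--     for pattern in ["sum_", "avg_", "count_", "min_", "max_", "median_"]:
--         if field_name.startswith(pattern):
--             aggregation = pattern.rstrip("_")
--             base_field = field_name[len(pattern) :]
--
--             return {
--                 "type": "aggregated_measure",
--                 "field_name": field_name,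
--                 "suggestion": f"Create {aggregation.upper()} measure for '{base_field}'",
--                 "action": "create_measure",
--                 "base_field": base_field,
--                 "aggregation": aggregation,
--                 "lookml_type": aggregation
--                 if aggregation in ["sum", "count", "average", "min", "max"]
--                 else "sum",
--             }
--
--     return None
-- ===== SOURCE B (Python) =====
-- from typing import Dict, List, Set, Optional
--
-- def _suggest_aggregated_measure(field_name: str) -> Dict:
--     """Suggest creating an aggregated measure."""
--     # Parse once: split at the first underscore, then one set lookup.
--     head, sep, rest = field_name.partition("_")
--     if sep and head in {"sum", "avg", "count", "min", "max", "median"}: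
--         return {
--             "type": "aggregated_measure",
--             "field_name": field_name,
--             "suggestion": f"Create {head.upper()} measure for '{rest}'",
--             "action": "create_measure",
--             "base_field": rest,
--             "aggregation": head,
--             "lookml_type": head if head in {"sum", "count", "min", "max"} else "sum",
--         }
--     return None
-- ===== Notes on version B (the rewrite author's own statement) =====
-- stated objective: idiomatic
-- what changed: B replaces A's loop over six prefix strings (startswith + rstrip + slice per pattern) with a single partition of the field name at the first underscore followed by one set-membership test on the leading segment.
import Mathlib
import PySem

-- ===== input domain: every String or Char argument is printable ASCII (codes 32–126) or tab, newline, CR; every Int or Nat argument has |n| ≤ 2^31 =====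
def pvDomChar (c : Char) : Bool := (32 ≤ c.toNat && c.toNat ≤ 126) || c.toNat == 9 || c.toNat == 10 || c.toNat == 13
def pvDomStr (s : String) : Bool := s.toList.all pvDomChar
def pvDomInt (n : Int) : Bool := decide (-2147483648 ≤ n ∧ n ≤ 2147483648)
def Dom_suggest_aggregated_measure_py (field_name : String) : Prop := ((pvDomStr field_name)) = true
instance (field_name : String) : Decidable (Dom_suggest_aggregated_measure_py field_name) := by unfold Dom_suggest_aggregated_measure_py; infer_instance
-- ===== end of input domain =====

-- B parses the field name once (partition at the first underscore + one set lookup) instead of scanning six prefixes; objective: idiomatic.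


-- ===== PORT A =====
-- pattern.rstrip("_") has no PySem primitive; ported by hand (drop trailing '_' via reverse/dropWhile) — exact.
def pvRstripU (p : List Char) : List Char := (p.reverse.dropWhile (fun c => c == '_')).reverse

-- the dict literal A returns (keys in Python insertion order; strings built on code points)
def pvDictA (field_name : String) (agg base : List Char) : List (String × String) :=
  [("type", "aggregated_measure"),
   ("field_name", field_name),
   ("suggestion", String.ofList ("Create ".toList ++ PySem.Chars.upper agg ++ " measure for '".toList ++ base ++ ['\''])),
   ("action", "create_measure"),
   ("base_field", String.ofList base),
   ("aggregation", String.ofList agg),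
   ("lookml_type",
     if agg ∈ ["sum".toList, "count".toList, "average".toList, "min".toList, "max".toList]
     then String.ofList agg else "sum")]

def pvPatterns : List (List Char) :=
  ["sum_".toList, "avg_".toList, "count_".toList, "min_".toList, "max_".toList, "median_".toList]

-- the for-loop over the six prefix patterns, with an early return on the first match
def pvALoop (field_name : String) : List (List Char) → Option (List (String × String))
  | [] => none
  | p :: ps =>
    if PySem.Chars.startswith field_name.toList p then
      some (pvDictA field_name (pvRstripU p)
        (PySem.Chars.slice field_name.toList (some ((p.length : Nat) : Int)) none))
    else pvALoop field_name ps

def suggest_aggregated_measure_py (field_name : String) : Option (List (String × String)) :=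
  pvALoop field_name pvPatterns

-- ===== PORT B =====
-- the dict literal B returns (same keys; B's lookml_type set drops the dead "average" entry)
def pvDictB (field_name : String) (head rest : List Char) : List (String × String) :=
  [("type", "aggregated_measure"),
   ("field_name", field_name),
   ("suggestion", String.ofList ("Create ".toList ++ PySem.Chars.upper head ++ " measure for '".toList ++ rest ++ ['\''])),
   ("action", "create_measure"),
   ("base_field", String.ofList rest),
   ("aggregation", String.ofList head),
   ("lookml_type",
     if head ∈ ["sum".toList, "count".toList, "min".toList, "max".toList]
     then String.ofList head else "sum")]

-- str.partition("_") has no PySem primitive; ported by hand via takeWhile/dropWhile on code points — exact for a one-char separator.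
def suggest_aggregated_measure_py_alt (field_name : String) : Option (List (String × String)) :=
  let l := field_name.toList
  let head := l.takeWhile (fun c => c != '_')
  let sepRest := l.dropWhile (fun c => c != '_')  -- separator + rest; nonempty ⟺ Python's `sep` is truthy
  if sepRest ≠ [] ∧
     head ∈ ["sum".toList, "avg".toList, "count".toList, "min".toList, "max".toList, "median".toList]
  then some (pvDictB field_name head sepRest.tail)
  else none

-- ===== PRECONDITION & SPEC =====
def Spec_suggest_aggregated_measure_py (field_name : String) (out : Option (List (String × String))) : Prop := out = suggest_aggregated_measure_py_alt field_name
instance (field_name : String) (out : Option (List (String × String))) : Decidable (Spec_suggest_aggregated_measure_py field_name out) := by unfold Spec_suggest_aggregated_measure_py; infer_instance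

-- ===== CLAIM (what is proved, stated in full; the proofs are below) =====
def Claim_equal_suggest_aggregated_measure_py : Prop := ∀ (field_name : String), Dom_suggest_aggregated_measure_py field_name → Spec_suggest_aggregated_measure_py field_name (suggest_aggregated_measure_py field_name)

-- ===== LEMMAS AND PROOFS =====

-- a nonempty dropWhile of the underscore predicate starts with '_'
theorem pv_drop_head (l : List Char) (h : l.dropWhile (fun c => c != '_') ≠ []) :
    l.dropWhile (fun c => c != '_') = '_' :: (l.dropWhile (fun c => c != '_')).tail := by
  rcases hd : l.dropWhile (fun c => c != '_') with _ | ⟨c, t⟩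
  · exact absurd hd h
  · have := List.head_dropWhile_not (fun c => c != '_') (l := l) (by simp [hd])
    simp [hd] at this ⊢
    exact this

-- takeWhile/dropWhile of a string of the shape p ++ '_' :: r, when p has no underscore
theorem pv_tw_dw (p r : List Char) (hp : '_' ∉ p) :
    (p ++ '_' :: r).takeWhile (fun c => c != '_') = p ∧
    (p ++ '_' :: r).dropWhile (fun c => c != '_') = '_' :: r := by
  induction p with
  | nil => simp
  | cons c cs ih =>
    have hc : c ≠ '_' := by intro h; exact hp (by simp [h])
    have := ih (fun h => hp (List.mem_cons_of_mem _ h))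
    simp [hc, this.1, this.2]

-- a string whose partition succeeded is (part before first '_') ++ "_" ++ (the tail)
theorem pv_split_shape (l p : List Char)
    (h1 : l.takeWhile (fun c => c != '_') = p) (h2 : l.dropWhile (fun c => c != '_') ≠ []) :
    l = (p ++ ['_']) ++ (l.dropWhile (fun c => c != '_')).tail := by
  have hd := pv_drop_head l h2
  conv_lhs => rw [← List.takeWhile_append_dropWhile (p := fun c => c != '_') (l := l), h1, hd]
  simp

-- A's prefix test, rephrased as B's partition: l starts with p ++ "_" iff the part before the
-- first underscore is exactly p and an underscore exists (p underscore-free)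
theorem pv_match_iff (l p : List Char) (hp : '_' ∉ p) :
    PySem.Chars.startswith l (p ++ ['_']) = true ↔
      l.takeWhile (fun c => c != '_') = p ∧ l.dropWhile (fun c => c != '_') ≠ [] := by
  rw [PySem.Chars.startswith_iff]
  constructor
  · rintro ⟨r, hr⟩
    have hl : l = p ++ '_' :: r := by rw [← hr]; simp
    have h := pv_tw_dw p r hp
    rw [hl]
    exact ⟨h.1, by simp [h.2]⟩
  · rintro ⟨h1, h2⟩
    exact ⟨(l.dropWhile (fun c => c != '_')).tail, (pv_split_shape l p h1 h2).symm⟩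

-- on a matching input, A's slice l[len(pattern):] is the tail after the first underscore
theorem pv_base_eq (l p : List Char)
    (h1 : l.takeWhile (fun c => c != '_') = p) (h2 : l.dropWhile (fun c => c != '_') ≠ []) :
    PySem.Chars.slice l (some (((p ++ ['_']).length : Nat) : Int)) none
      = (l.dropWhile (fun c => c != '_')).tail := by
  rw [PySem.Chars.slice_eq_listSlice, PySem.List.slice_from_natCast]
  conv_lhs => rw [pv_split_shape l p h1 h2]
  exact List.drop_left

-- one matching iteration of A's loop returns exactly what B returns
theorem pv_branch (fn : String) (p : List Char) (hp : '_' ∉ p)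
    (rest : Option (List (String × String)))
    (h : PySem.Chars.startswith fn.toList (p ++ ['_']) = true)
    (hmem : p ∈ ["sum".toList, "avg".toList, "count".toList, "min".toList, "max".toList, "median".toList])
    (hdict : ∀ r : List Char, pvDictA fn (pvRstripU (p ++ ['_'])) r = pvDictB fn p r) :
    (if PySem.Chars.startswith fn.toList (p ++ ['_']) = true
     then some (pvDictA fn (pvRstripU (p ++ ['_']))
       (PySem.Chars.slice fn.toList (some (((p ++ ['_']).length : Nat) : Int)) none))
     else rest) = suggest_aggregated_measure_py_alt fn := by
  obtain ⟨ht, hd⟩ := (pv_match_iff fn.toList p hp).mp h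
  have hcond : fn.toList.dropWhile (fun c => c != '_') ≠ [] ∧
      fn.toList.takeWhile (fun c => c != '_') ∈
        ["sum".toList, "avg".toList, "count".toList, "min".toList, "max".toList, "median".toList] :=
    ⟨hd, by rw [ht]; exact hmem⟩
  simp only [suggest_aggregated_measure_py_alt]
  rw [if_pos h, if_pos hcond, pv_base_eq fn.toList p ht hd, hdict, ht]

-- ===== VERDICT (by name: the statement is the Claim_ definition above) =====
theorem suggest_aggregated_measure_py_spec : Claim_equal_suggest_aggregated_measure_py := by
  intro fn _
  unfold Spec_suggest_aggregated_measure_py suggest_aggregated_measure_py pvPatterns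
  simp only [pvALoop]
  by_cases h1 : PySem.Chars.startswith fn.toList "sum_".toList = true
  · exact pv_branch fn "sum".toList (by decide) _ h1 (by decide) (fun r => rfl)
  rw [if_neg h1]
  by_cases h2 : PySem.Chars.startswith fn.toList "avg_".toList = true
  · exact pv_branch fn "avg".toList (by decide) _ h2 (by decide) (fun r => rfl)
  rw [if_neg h2]
  by_cases h3 : PySem.Chars.startswith fn.toList "count_".toList = true
  · exact pv_branch fn "count".toList (by decide) _ h3 (by decide) (fun r => rfl)
  rw [if_neg h3]
  by_cases h4 : PySem.Chars.startswith fn.toList "min_".toList = true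
  · exact pv_branch fn "min".toList (by decide) _ h4 (by decide) (fun r => rfl)
  rw [if_neg h4]
  by_cases h5 : PySem.Chars.startswith fn.toList "max_".toList = true
  · exact pv_branch fn "max".toList (by decide) _ h5 (by decide) (fun r => rfl)
  rw [if_neg h5]
  by_cases h6 : PySem.Chars.startswith fn.toList "median_".toList = true
  · exact pv_branch fn "median".toList (by decide) _ h6 (by decide) (fun r => rfl)
  rw [if_neg h6]
  -- no pattern matches: B's single test cannot hold either
  simp only [suggest_aggregated_measure_py_alt]
  rw [if_neg]
  rintro ⟨hd, hmem⟩
  simp only [List.mem_cons, List.not_mem_nil, or_false] at hmem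
  rcases hmem with ht | ht | ht | ht | ht | ht
  · exact h1 ((pv_match_iff fn.toList "sum".toList (by decide)).mpr ⟨ht, hd⟩)
  · exact h2 ((pv_match_iff fn.toList "avg".toList (by decide)).mpr ⟨ht, hd⟩)
  · exact h3 ((pv_match_iff fn.toList "count".toList (by decide)).mpr ⟨ht, hd⟩)
  · exact h4 ((pv_match_iff fn.toList "min".toList (by decide)).mpr ⟨ht, hd⟩)
  · exact h5 ((pv_match_iff fn.toList "max".toList (by decide)).mpr ⟨ht, hd⟩)
  · exact h6 ((pv_match_iff fn.toList "median".toList (by decide)).mpr ⟨ht, hd⟩)
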